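-- pv_equiv track=rewrite | github.com/CarsonBarnstable/Advent_of_Code | AoC24/D19/sol1.py | can_build_design
-- ===== SOURCE A (Python) =====
-- def can_build_design(target_design, available_pieces):
--     """
--     Checks if a target design can be built from available pieces, using each piece at most once.
--     Uses recursion while matching starting sub-strings with available pieces
--     """
--     # if fully reduced
--     if len(target_design) == 0:
--         return True
--
--     else:  # must try to match beginnings
--         for matching_piece in available_pieces:
--             # target's start *does match* the available piece
--             if target_design.startswith(matching_piece):
--                 new_sub_design = target_design.replace(matching_piece, "", 1)  # only the first occurence
--                 remaining_pieces = [piece for piece in available_pieces if piece != matching_piece]  # need to make copy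
--
--                 # resurse on sub-design
--                 if can_build_design(new_sub_design, remaining_pieces):
--                     return True
--                 # continue
--
--         # if nothing matches the beginning of the target design, cannot be built
--         return False
-- ===== SOURCE B (Python) =====
-- def can_build_design(target_design, available_pieces):
--     """
--     Same result as the recursive search, but memoized on (position, remaining pieces):
--     duplicates collapse to one piece (matching the original's remove-all-copies step),
--     empty pieces are no-ops and are dropped, and repeated search states are cached.
--     """
--     pieces = tuple(dict.fromkeys(p for p in available_pieces if p))
--     n = len(target_design)
--     memo = {}
--
--     def solve(i, rem):
--         if i == n:
--             return True
--         key = (i, rem)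
--         if key in memo:
--             return memo[key]
--         res = False
--         for j in range(len(rem)):
--             p = rem[j]
--             if not res and target_design.startswith(p, i):
--                 res = solve(i + len(p), rem[:j] + rem[j + 1:])
--         memo[key] = res
--         return res
--
--     return solve(0, pieces)
-- ===== Notes on version B (the rewrite author's own statement) =====
-- stated objective: faster
-- what changed: Replaces the plain exponential DFS over orderings (which rebuilds strings and piece lists at every call) with a memoized search keyed on (position in the target, tuple of remaining distinct non-empty pieces), after collapsing duplicates and dropping empty pieces up front, so repeated search states are computed once.
import Mathlib
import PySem

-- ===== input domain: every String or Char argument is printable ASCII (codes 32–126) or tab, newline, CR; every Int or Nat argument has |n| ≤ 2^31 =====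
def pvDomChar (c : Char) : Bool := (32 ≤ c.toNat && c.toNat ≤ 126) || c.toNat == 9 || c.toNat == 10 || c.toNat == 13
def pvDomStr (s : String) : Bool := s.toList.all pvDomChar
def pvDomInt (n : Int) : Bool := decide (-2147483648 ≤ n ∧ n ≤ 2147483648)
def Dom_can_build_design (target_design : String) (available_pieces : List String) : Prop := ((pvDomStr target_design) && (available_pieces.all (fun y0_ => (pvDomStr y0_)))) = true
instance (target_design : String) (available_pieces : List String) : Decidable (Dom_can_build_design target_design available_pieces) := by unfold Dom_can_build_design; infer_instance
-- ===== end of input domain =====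

-- B replaces A's exponential DFS over piece orderings by a search memoized on
-- (position in target, remaining distinct non-empty pieces); equal return value everywhere.

-- ===== PORT A =====
-- target.replace(piece, "", 1): PySem has no count-limited replace, so this helper is a
-- hand port, exact for Python's s.replace(old, "", 1): remove the first occurrence of
-- old (located at index s.find(old); no occurrence leaves s unchanged).
def pvReplace1 (s old : List Char) : List Char :=
  let i := PySem.Chars.find s old
  if i = -1 then s else s.take i.toNat ++ s.drop (i.toNat + old.length)

-- A's recursive function, on the code-point list of the target (the `for` loop with its
-- early `return True` and final `return False` is the short-circuiting `any`)
def pvCanA (target : List Char) (pieces : List String) : Bool :=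
  if target.length = 0 then true
  else
    pieces.attach.any (fun q =>
      PySem.Chars.startswith target q.1.toList &&
      pvCanA (pvReplace1 target q.1.toList) (pieces.filter (fun piece => piece != q.1)))
termination_by pieces.length
decreasing_by
  rw [List.length_unattach, ← List.length_attach (l := pieces)]
  exact List.length_filter_lt_length_iff_exists.mpr ⟨q, List.mem_attach _ _, by simp⟩

def can_build_design (target_design : String) (available_pieces : List String) : Bool :=
  pvCanA target_design.toList available_pieces

-- ===== PORT B =====
-- memo: (position in target, tuple of remaining pieces) -> cached answer.
-- The inner `def solve(i, rem)`. `fuel` is a totality guard only: every nested call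
-- drops one piece from `rem`, so `rem.length + 1` fuel is never exhausted; the
-- `for j in range(len(rem))` loop is the fold over `range`, `rem[j]` is in range by
-- construction (ported with getD), and `rem[:j] + rem[j+1:]` is `eraseIdx j`;
-- target_design.startswith(p, i) with 0 <= i <= len(target) matches p at position i.
def pvSolveB (t : List Char) (fuel : Nat) (i : Nat) (rem : List String)
    (memo : PySem.Dict (Nat × List String) Bool) : Bool × PySem.Dict (Nat × List String) Bool :=
  match fuel with
  | 0 => (false, memo)
  | fuel + 1 =>
    if i = t.length then (true, memo)
    else
      match memo.get? (i, rem) with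
      | some b => (b, memo)
      | none =>
        let r := (List.range rem.length).foldl (fun acc j =>
          let p := rem.getD j ""
          if !acc.1 && PySem.Chars.startswith (t.drop i) p.toList then
            pvSolveB t fuel (i + p.toList.length) (rem.eraseIdx j) acc.2
          else acc) (false, memo)
        (r.1, r.2.insert (i, rem) r.1)

-- pieces = tuple(dict.fromkeys(p for p in available_pieces if p)); memo = {}; solve(0, pieces)
def can_build_design_alt (target_design : String) (available_pieces : List String) : Bool :=
  (pvSolveB target_design.toList
    ((PySem.List.dedup (available_pieces.filter (fun p => p != ""))).length + 1) 0
    (PySem.List.dedup (available_pieces.filter (fun p => p != "")))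
    PySem.Dict.empty).1

-- ===== PRECONDITION & SPEC =====
def Spec_can_build_design (target_design : String) (available_pieces : List String) (out : Bool) : Prop := out = can_build_design_alt target_design available_pieces
instance (target_design : String) (available_pieces : List String) (out : Bool) : Decidable (Spec_can_build_design target_design available_pieces out) := by unfold Spec_can_build_design; infer_instance

-- ===== CLAIM (what is proved, stated in full; the proofs are below) =====
def Claim_equal_can_build_design : Prop := ∀ (target_design : String) (available_pieces : List String), Dom_can_build_design target_design available_pieces → Spec_can_build_design target_design available_pieces (can_build_design target_design available_pieces)

-- ===== LEMMAS AND PROOFS =====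

-- if the piece is a prefix, its first occurrence is at index 0, so A's
-- replace(piece, "", 1) is exactly "drop the prefix"
theorem pv_find_prefix (t p : List Char) (h : p <+: t) : PySem.Chars.find t p = 0 := by
  have hne : PySem.Chars.find t p ≠ -1 := fun hc => ((PySem.Chars.find_eq_neg_one_iff t p).mp hc) h.isInfix
  have hz : PySem.Chars.findFrom t p ((0 : Nat) : Int) = PySem.Chars.find t p := by
    rw [Nat.cast_zero, PySem.Chars.findFrom_zero]
  have h0 := PySem.Chars.findFrom_natCast_spec t p 0 (Nat.zero_le _) (by rw [hz]; exact hne)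
  rw [hz] at h0
  obtain ⟨h1, _, h3⟩ := h0
  by_contra hne0
  have hpos : 0 < (PySem.Chars.find t p).toNat := by omega
  exact h3 0 (Nat.zero_le _) hpos (by simpa using h)

theorem pv_replace1_eq_drop (t p : List Char) (h : PySem.Chars.startswith t p = true) :
    pvReplace1 t p = t.drop p.length := by
  have hf : PySem.Chars.find t p = 0 := pv_find_prefix t p ((PySem.Chars.startswith_iff t p).mp h)
  simp [pvReplace1, hf]

-- dedup (= dict.fromkeys, first occurrences) commutes with filter
theorem pv_filter_add (q : String → Bool) (acc : List String) (x : String) :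
    (PySem.Set.add acc x).filter q =
      if q x then PySem.Set.add (acc.filter q) x else acc.filter q := by
  by_cases hx : x ∈ acc
  · have hx' : x ∈ acc.filter q ∨ ¬ q x = true := by
      by_cases hq : q x = true
      · exact Or.inl (List.mem_filter.mpr ⟨hx, hq⟩)
      · exact Or.inr hq
    by_cases hq : q x = true
    · rcases hx' with hmem | hnq
      · simp [PySem.Set.add, hx, hq, hmem]
      · exact absurd hq hnq
    · simp [PySem.Set.add, hx, hq]
  · by_cases hq : q x = true
    · have hx2 : x ∉ acc.filter q := fun hc => hx (List.mem_filter.mp hc).1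
      simp [PySem.Set.add, hx, hq, hx2]
    · simp [PySem.Set.add, hx, hq]

theorem pv_filter_foldl (q : String → Bool) :
    ∀ (xs acc : List String),
      (xs.filter q).foldl PySem.Set.add (acc.filter q) = (xs.foldl PySem.Set.add acc).filter q := by
  intro xs
  induction xs with
  | nil => intro acc; rfl
  | cons x xs IH =>
    intro acc
    by_cases hq : q x = true
    · have h2 : (PySem.Set.add acc x).filter q = PySem.Set.add (acc.filter q) x := by
        rw [pv_filter_add]; simp [hq]
      have hfc : (x :: xs).filter q = x :: xs.filter q := by simp [hq]
      rw [hfc, List.foldl_cons, List.foldl_cons, ← h2, IH]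
    · have h2 : (PySem.Set.add acc x).filter q = acc.filter q := by
        rw [pv_filter_add]; simp [hq]
      have hfc : (x :: xs).filter q = xs.filter q := by simp [hq]
      rw [hfc, List.foldl_cons, ← h2, IH]

theorem pv_dedup_filter (q : String → Bool) (xs : List String) :
    PySem.List.dedup (xs.filter q) = (PySem.List.dedup xs).filter q := by
  have h1 : PySem.List.dedup (xs.filter q) = (xs.filter q).foldl PySem.Set.add [] := by
    simp [PySem.Set.ofList_eq_foldl]
  have h2 : PySem.List.dedup xs = xs.foldl PySem.Set.add [] := by
    simp [PySem.Set.ofList_eq_foldl]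
  rw [h1, h2]
  have := pv_filter_foldl q xs []
  simpa using this

-- unfolding lemmas for A's recursion
theorem pv_canA_zero (t : List Char) (S : List String) (ht : t.length = 0) :
    pvCanA t S = true := by
  rw [pvCanA.eq_def, if_pos ht]

theorem pv_canA_any (t : List Char) (S : List String) (ht : ¬ t.length = 0) :
    pvCanA t S = S.any (fun p =>
      PySem.Chars.startswith t p.toList &&
      pvCanA (pvReplace1 t p.toList) (S.filter (fun piece => piece != p))) := by
  rw [pvCanA.eq_def, if_neg ht]
  simp

-- A computes the same value on the deduplicated, empty-piece-free list
theorem pv_canon : ∀ (n : Nat) (ps : List String), ps.length ≤ n → ∀ (t : List Char),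
    pvCanA t ps = pvCanA t (PySem.List.dedup (ps.filter (fun p => p != ""))) := by
  intro n
  induction n with
  | zero =>
    intro ps hps t
    have hnil : ps = [] := by cases ps <;> simp_all
    subst hnil
    rfl
  | succ n IH =>
    intro ps hps t
    by_cases ht : t.length = 0
    · rw [pv_canA_zero t _ ht, pv_canA_zero t _ ht]
    · have hC : ∀ p : String, p ∈ PySem.List.dedup (ps.filter (fun p => p != "")) ↔ (p ∈ ps ∧ p ≠ "") := by
        intro p
        rw [PySem.List.mem_dedup, List.mem_filter]
        simp
      rw [pv_canA_any t ps ht, pv_canA_any t _ ht]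
      -- branch equality on non-empty members
      have hbr : ∀ p : String, p ∈ ps → p ≠ "" →
          (PySem.Chars.startswith t p.toList &&
            pvCanA (pvReplace1 t p.toList) (ps.filter (fun piece => piece != p))) =
          (PySem.Chars.startswith t p.toList &&
            pvCanA (pvReplace1 t p.toList)
              ((PySem.List.dedup (ps.filter (fun p => p != ""))).filter (fun piece => piece != p))) := by
        intro p hp hpne
        cases hsw : PySem.Chars.startswith t p.toList with
        | false => simp
        | true =>
          have hlt : (ps.filter (fun piece => piece != p)).length < ps.length :=
            List.length_filter_lt_length_iff_exists.mpr ⟨p, hp, by simp⟩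
          have h1 := IH (ps.filter (fun piece => piece != p)) (by omega) (pvReplace1 t p.toList)
          have h2 : PySem.List.dedup ((ps.filter (fun piece => piece != p)).filter (fun p => p != "")) =
              (PySem.List.dedup (ps.filter (fun p => p != ""))).filter (fun piece => piece != p) := by
            rw [List.filter_comm, pv_dedup_filter]
          rw [h1, h2]
      -- the empty piece's branch is the whole right-hand side
      have hemp : "" ∈ ps →
          (PySem.Chars.startswith t ("" : String).toList &&
            pvCanA (pvReplace1 t ("" : String).toList) (ps.filter (fun piece => piece != ""))) =
          pvCanA t (PySem.List.dedup (ps.filter (fun p => p != ""))) := by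
        intro hp
        have hsw : PySem.Chars.startswith t ("" : String).toList = true := by
          exact (PySem.Chars.startswith_iff _ _).mpr (by simp)
        have hrep : pvReplace1 t ("" : String).toList = t := by
          rw [pv_replace1_eq_drop t _ hsw]; simp
        have hlt : (ps.filter (fun piece => piece != "")).length < ps.length :=
          List.length_filter_lt_length_iff_exists.mpr ⟨"", hp, by simp⟩
        have h1 := IH (ps.filter (fun piece => piece != "")) (by omega) t
        have h2 : (ps.filter (fun piece => piece != "")).filter (fun p => p != "") =
            ps.filter (fun p => p != "") := by
          rw [List.filter_comm]
          rw [List.filter_filter]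
          simp
        rw [hsw, hrep, Bool.true_and, h1, h2]
      -- compare the two `any`s
      cases hR : pvCanA t (PySem.List.dedup (ps.filter (fun p => p != ""))) with
      | true =>
        rw [pv_canA_any t _ ht] at hR
        rw [hR]
        simp only [List.any_eq_true] at hR ⊢
        obtain ⟨p, hpC, hbp⟩ := hR
        obtain ⟨hpps, hpne⟩ := (hC p).mp hpC
        exact ⟨p, hpps, by rw [hbr p hpps hpne]; exact hbp⟩
      | false =>
        have hR' := hR
        rw [pv_canA_any t _ ht] at hR'
        rw [hR']
        simp only [List.any_eq_false] at hR' ⊢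
        intro p hp
        by_cases hpe : p = ""
        · subst hpe
          rw [hemp hp, hR]
          simp
        · rw [hbr p hp hpe]
          exact hR' p ((hC p).mpr ⟨hp, hpe⟩)

-- erasing index j from a duplicate-free list is filtering out rem[j]
theorem pv_eraseIdx_filter : ∀ (l : List String), l.Nodup → ∀ (j : Nat) (hj : j < l.length),
    l.eraseIdx j = l.filter (fun piece => piece != l[j]) := by
  intro l
  induction l with
  | nil => intro _ j hj; simp at hj
  | cons x xs IH =>
    intro hl j hj
    have hx : x ∉ xs := (List.nodup_cons.mp hl).1
    cases j with
    | zero =>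
      simp only [List.eraseIdx, List.getElem_cons_zero, List.filter_cons]
      simp only [bne_self_eq_false, Bool.false_eq_true, ite_false]
      rw [List.filter_eq_self.mpr]
      intro a ha
      simp only [bne_iff_ne, ne_eq]
      exact fun hc => hx (hc ▸ ha)
    | succ m =>
      have hm : m < xs.length := by simpa using hj
      have hmem : xs[m] ∈ xs := List.getElem_mem hm
      simp only [List.eraseIdx_cons_succ, List.getElem_cons_succ, List.filter_cons]
      have hxne : (x != xs[m]) = true := by
        simp only [bne_iff_ne, ne_eq]
        exact fun hc => hx (hc ▸ hmem)
      rw [if_pos (by simp [hxne])]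
      rw [IH (List.nodup_cons.mp hl).2 m hm]

-- the branch value of the search at position i with remaining pieces S
def pvBr (t : List Char) (i : Nat) (S : List String) (p : String) : Bool :=
  PySem.Chars.startswith (t.drop i) p.toList &&
    pvCanA (t.drop (i + p.toList.length)) (S.filter (fun piece => piece != p))

theorem pv_canA_br (t : List Char) (i : Nat) (S : List String) (hi : i < t.length) :
    pvCanA (t.drop i) S = S.any (pvBr t i S) := by
  rw [pv_canA_any (t.drop i) S (by simp; omega)]
  refine PySem.List.any_congr_mem ?_
  intro p hp
  unfold pvBr
  cases hsw : PySem.Chars.startswith (t.drop i) p.toList with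
  | false => simp
  | true =>
    rw [pv_replace1_eq_drop _ _ hsw]
    simp [List.drop_drop]

-- every cached answer is the true answer for its state
def pvValid (t : List Char) (memo : PySem.Dict (Nat × List String) Bool) : Prop :=
  ∀ (k : Nat × List String) (b : Bool), memo.get? k = some b → b = pvCanA (t.drop k.1) k.2

-- range-any over positions is any over the list
theorem pv_any_range (l : List String) (g : String → Bool) :
    (List.range l.length).any (fun j => g (l.getD j "")) = l.any g := by
  cases hb : l.any g with
  | true =>
    obtain ⟨x, hx, hgx⟩ := List.any_eq_true.mp hb
    obtain ⟨j, hj, hxe⟩ := List.getElem_of_mem hx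
    refine List.any_eq_true.mpr ⟨j, List.mem_range.mpr hj, ?_⟩
    rw [List.getD_eq_getElem l "" hj, hxe]
    exact hgx
  | false =>
    refine List.any_eq_false.mpr ?_
    intro j hj
    have hj' := List.mem_range.mp hj
    rw [List.getD_eq_getElem l "" hj']
    exact List.any_eq_false.mp hb _ (List.getElem_mem hj')

-- the fold over positions computes `any pvBr` over them and keeps the memo valid
theorem pv_fold (t : List Char) (rem : List String) (fuel i : Nat)
    (IHs : ∀ (i' : Nat) (rem' : List String) (memo' : PySem.Dict (Nat × List String) Bool),
      rem'.length < fuel → rem'.Nodup → (∀ p ∈ rem', p ≠ "") → i' ≤ t.length →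
      pvValid t memo' →
      (pvSolveB t fuel i' rem' memo').1 = pvCanA (t.drop i') rem' ∧
        pvValid t (pvSolveB t fuel i' rem' memo').2)
    (hnd : rem.Nodup) (hne : ∀ p ∈ rem, p ≠ "") (hfuel : rem.length ≤ fuel) (hi : i ≤ t.length) :
    ∀ (js : List Nat), (∀ j ∈ js, j < rem.length) →
      ∀ (acc : Bool × PySem.Dict (Nat × List String) Bool), pvValid t acc.2 →
      (js.foldl (fun acc j =>
          let p := rem.getD j ""
          if !acc.1 && PySem.Chars.startswith (t.drop i) p.toList then
            pvSolveB t fuel (i + p.toList.length) (rem.eraseIdx j) acc.2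
          else acc) acc).1
        = (acc.1 || js.any (fun j => pvBr t i rem (rem.getD j ""))) ∧
      pvValid t (js.foldl (fun acc j =>
          let p := rem.getD j ""
          if !acc.1 && PySem.Chars.startswith (t.drop i) p.toList then
            pvSolveB t fuel (i + p.toList.length) (rem.eraseIdx j) acc.2
          else acc) acc).2 := by
  intro js
  induction js with
  | nil =>
    intro _ acc hv
    refine ⟨?_, hv⟩
    simp
  | cons j js IHjs =>
    intro hjs acc hv
    obtain ⟨ares, amemo⟩ := acc
    have hj : j < rem.length := hjs j List.mem_cons_self
    have hgd : rem.getD j "" = rem[j] := List.getD_eq_getElem rem "" hj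
    have htl : ∀ x ∈ js, x < rem.length := fun x hx => hjs x (List.mem_cons_of_mem _ hx)
    rw [List.foldl_cons, List.any_cons]
    cases ares with
    | true =>
      have hstep : (let p := rem.getD j ""
          if !(true, amemo).1 && PySem.Chars.startswith (t.drop i) p.toList then
            pvSolveB t fuel (i + p.toList.length) (rem.eraseIdx j) (true, amemo).2
          else (true, amemo)) = (true, amemo) := by simp
      rw [hstep]
      obtain ⟨h1, h2⟩ := IHjs htl (true, amemo) hv
      refine ⟨?_, h2⟩
      rw [h1]
      simp
    | false =>
      cases hsw : PySem.Chars.startswith (t.drop i) (rem.getD j "").toList with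
      | false =>
        have hstep : (let p := rem.getD j ""
            if !(false, amemo).1 && PySem.Chars.startswith (t.drop i) p.toList then
              pvSolveB t fuel (i + p.toList.length) (rem.eraseIdx j) (false, amemo).2
            else (false, amemo)) = (false, amemo) := by
          simp only [hsw, Bool.not_false, Bool.true_and, Bool.false_eq_true, if_false]
        rw [hstep]
        obtain ⟨h1, h2⟩ := IHjs htl (false, amemo) hv
        refine ⟨?_, h2⟩
        rw [h1]
        have hbrf : pvBr t i rem (rem.getD j "") = false := by
          unfold pvBr
          rw [hsw]
          simp
        rw [hbrf]
        simp
      | true =>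
        have hpre : (rem.getD j "").toList <+: t.drop i := (PySem.Chars.startswith_iff _ _).mp hsw
        have hle : i + (rem.getD j "").toList.length ≤ t.length := by
          have := hpre.length_le
          simp only [List.length_drop] at this
          omega
        have hlt : (rem.eraseIdx j).length < fuel := by
          simp [List.length_eraseIdx, hj]
          omega
        have hstep : (let p := rem.getD j ""
            if !(false, amemo).1 && PySem.Chars.startswith (t.drop i) p.toList then
              pvSolveB t fuel (i + p.toList.length) (rem.eraseIdx j) (false, amemo).2
            else (false, amemo))
            = pvSolveB t fuel (i + (rem.getD j "").toList.length) (rem.eraseIdx j) amemo := by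
          simp only [hsw, Bool.not_false, Bool.true_and, if_true]
        rw [hstep]
        obtain ⟨h1, h2⟩ := IHs (i + (rem.getD j "").toList.length) (rem.eraseIdx j) amemo hlt
          (hnd.eraseIdx j) (fun q hq => hne q (List.eraseIdx_subset hq)) hle hv
        have hbrj : pvBr t i rem (rem.getD j "") =
            (pvSolveB t fuel (i + (rem.getD j "").toList.length) (rem.eraseIdx j) amemo).1 := by
          unfold pvBr
          rw [hsw, Bool.true_and, h1, pv_eraseIdx_filter rem hnd j hj, hgd]
        obtain ⟨g1, g2⟩ := IHjs htl
          (pvSolveB t fuel (i + (rem.getD j "").toList.length) (rem.eraseIdx j) amemo) h2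
        refine ⟨?_, g2⟩
        rw [g1, hbrj]
        simp

-- the memoized solver computes A's recursion on its state
theorem pv_solve : ∀ (fuel : Nat) (t : List Char) (i : Nat) (rem : List String)
    (memo : PySem.Dict (Nat × List String) Bool),
    rem.length < fuel → rem.Nodup → (∀ p ∈ rem, p ≠ "") → i ≤ t.length → pvValid t memo →
    (pvSolveB t fuel i rem memo).1 = pvCanA (t.drop i) rem ∧
      pvValid t (pvSolveB t fuel i rem memo).2 := by
  intro fuel
  induction fuel with
  | zero => intro t i rem memo hlen; omega
  | succ fuel IH =>
    intro t i rem memo hlen hnd hne hi hval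
    simp only [pvSolveB]
    by_cases hit : i = t.length
    · rw [if_pos hit]
      refine ⟨?_, hval⟩
      rw [hit, List.drop_length, pv_canA_zero _ _ rfl]
    · have hilt : i < t.length := lt_of_le_of_ne hi hit
      rw [if_neg hit]
      cases hget : memo.get? (i, rem) with
      | some b =>
        exact ⟨hval (i, rem) b hget, hval⟩
      | none =>
        obtain ⟨h1, h2⟩ := pv_fold t rem fuel i
          (fun i' rem' memo' hl hn hp hi' hv => IH t i' rem' memo' hl hn hp hi' hv)
          hnd hne (by omega) hi (List.range rem.length)
          (fun j hj => List.mem_range.mp hj) (false, memo) hval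
        have hres : ((List.range rem.length).foldl (fun acc j =>
            let p := rem.getD j ""
            if !acc.1 && PySem.Chars.startswith (t.drop i) p.toList then
              pvSolveB t fuel (i + p.toList.length) (rem.eraseIdx j) acc.2
            else acc) (false, memo)).1 = pvCanA (t.drop i) rem := by
          rw [h1, Bool.false_or, pv_any_range rem (pvBr t i rem), ← pv_canA_br t i rem hilt]
        refine ⟨hres, ?_⟩
        intro kk bb hgetk
        by_cases hkk : kk = (i, rem)
        · subst hkk
          rw [PySem.Dict.get?_insert_self] at hgetk
          have hbb : ((List.range rem.length).foldl (fun acc j =>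
              let p := rem.getD j ""
              if !acc.1 && PySem.Chars.startswith (t.drop i) p.toList then
                pvSolveB t fuel (i + p.toList.length) (rem.eraseIdx j) acc.2
              else acc) (false, memo)).1 = bb := by injection hgetk
          rw [← hbb, hres]
        · rw [PySem.Dict.get?_insert_of_ne _ _ hkk] at hgetk
          exact h2 kk bb hgetk

-- the two programs agree
theorem pv_equiv (t : String) (ps : List String) :
    can_build_design t ps = can_build_design_alt t ps := by
  unfold can_build_design can_build_design_alt
  have hnd : (PySem.List.dedup (ps.filter (fun p => p != ""))).Nodup := PySem.List.nodup_dedup _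
  have hne : ∀ p ∈ PySem.List.dedup (ps.filter (fun p => p != "")), p ≠ "" := by
    intro p hp
    have := (List.mem_filter.mp ((PySem.List.mem_dedup _ _).mp hp)).2
    simpa using this
  have hval : pvValid t.toList PySem.Dict.empty := by
    intro k b h
    simp at h
  obtain ⟨h1, _⟩ := pv_solve ((PySem.List.dedup (ps.filter (fun p => p != ""))).length + 1)
    t.toList 0 (PySem.List.dedup (ps.filter (fun p => p != ""))) PySem.Dict.empty
    (by omega) hnd hne (Nat.zero_le _) hval
  rw [h1, List.drop_zero]
  exact pv_canon ps.length ps le_rfl t.toList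

-- ===== VERDICT (by name: the statement is the Claim_ definition above) =====
theorem can_build_design_spec : Claim_equal_can_build_design := by
  intro t ps _
  exact pv_equiv t ps
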